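-- pv_equiv track=rewrite | github.com/mtrazzi/rl-book-challenge | src/5/blackjack.py | player_cards
-- ===== SOURCE A (Python) =====
-- ACE_LOW = 1
--
-- ACE_HIGH = 11
--
-- def player_cards(player_sum, player_usable_ace):
--   cards = []
--   if player_usable_ace:
--     cards.append(ACE_LOW)
--     player_sum -= ACE_HIGH
--   while player_sum > 0:
--     card = min(player_sum, 10)
--     cards.append(card)
--     player_sum -= card
--   return cards
-- ===== SOURCE B (Python) =====
-- ACE_LOW = 1
--
-- ACE_HIGH = 11
--
-- def player_cards(player_sum, player_usable_ace):
--   if player_usable_ace: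
--     cards = [ACE_LOW]
--     s = player_sum - ACE_HIGH
--   else:
--     cards = []
--     s = player_sum
--   if s > 0:
--     q, r = divmod(s, 10)
--     cards += [10] * q
--     if r:
--       cards.append(r)
--   return cards
-- ===== Notes on version B (the rewrite author's own statement) =====
-- stated objective: simpler
-- what changed: Replaces the repeated-subtraction while loop with a single divmod: append s // 10 tens at once and then the nonzero remainder.
import Mathlib
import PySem

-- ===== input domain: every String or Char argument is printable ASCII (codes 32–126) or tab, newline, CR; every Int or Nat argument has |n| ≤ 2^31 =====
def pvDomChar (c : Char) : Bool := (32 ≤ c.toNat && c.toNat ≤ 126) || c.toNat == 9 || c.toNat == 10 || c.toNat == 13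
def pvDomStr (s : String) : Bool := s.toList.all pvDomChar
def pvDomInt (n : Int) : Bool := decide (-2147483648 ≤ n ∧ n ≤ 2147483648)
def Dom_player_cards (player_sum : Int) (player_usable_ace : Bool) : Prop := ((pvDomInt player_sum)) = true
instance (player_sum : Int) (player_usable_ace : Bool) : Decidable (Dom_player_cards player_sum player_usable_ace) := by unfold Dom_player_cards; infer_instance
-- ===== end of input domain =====

-- B replaces A's repeated-subtraction while loop by one divmod (simpler, closed form).

-- ===== PORT A =====
-- the 'while player_sum > 0' loop of A, with accumulated-card appends made a cons
def pvLoopA (s : Int) : List Int :=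
  if 0 < s then min s 10 :: pvLoopA (s - min s 10) else []
termination_by s.toNat
decreasing_by omega

def player_cards (player_sum : Int) (player_usable_ace : Bool) : List Int :=
  if player_usable_ace then 1 :: pvLoopA (player_sum - 11) else pvLoopA player_sum

-- ===== PORT B =====
def player_cards_alt (player_sum : Int) (player_usable_ace : Bool) : List Int :=
  let cs := if player_usable_ace then ([(1 : Int)], player_sum - 11) else ([], player_sum)
  let cards := cs.1
  let s := cs.2
  if 0 < s then
    let q := PySem.Int.floordiv s 10
    let r := PySem.Int.mod s 10
    (cards ++ List.replicate q.toNat 10) ++ (if r ≠ 0 then [r] else [])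
  else cards

-- ===== PRECONDITION & SPEC =====
def Spec_player_cards (player_sum : Int) (player_usable_ace : Bool) (out : List Int) : Prop := out = player_cards_alt player_sum player_usable_ace
instance (player_sum : Int) (player_usable_ace : Bool) (out : List Int) : Decidable (Spec_player_cards player_sum player_usable_ace out) := by unfold Spec_player_cards; infer_instance

-- ===== CLAIM (what is proved, stated in full; the proofs are below) =====
def Claim_equal_player_cards : Prop := ∀ (player_sum : Int) (player_usable_ace : Bool), Dom_player_cards player_sum player_usable_ace → Spec_player_cards player_sum player_usable_ace (player_cards player_sum player_usable_ace)

-- ===== LEMMAS AND PROOFS =====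

-- A's loop computes the divmod closed form
theorem pvLoopA_closed : ∀ (n : Nat) (s : Int), s.toNat = n →
    pvLoopA s = if 0 < s then
      List.replicate (s / 10).toNat 10 ++ (if s % 10 ≠ 0 then [s % 10] else [])
    else [] := by
  intro n
  induction n using Nat.strong_induction_on with
  | _ n ih =>
    intro s hs
    rw [pvLoopA]
    by_cases hpos : 0 < s
    · simp only [hpos, if_pos]
      by_cases hbig : 10 < s
      · have hmin : min s 10 = 10 := by omega
        rw [hmin, ih (s - 10).toNat (by omega) (s - 10) rfl]
        have hp : 0 < s - 10 := by omega
        simp only [hp, if_pos]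
        have hq : (s / 10).toNat = ((s - 10) / 10).toNat + 1 := by omega
        have hr : s % 10 = (s - 10) % 10 := by omega
        rw [hq, hr, List.replicate_succ]
        simp
      · -- 0 < s ≤ 10
        have hmin : min s 10 = s := by omega
        rw [hmin]
        simp only [sub_self]
        rw [pvLoopA]
        by_cases h10 : s = 10
        · subst h10; decide
        · have hq : (s / 10).toNat = 0 := by omega
          have hr : s % 10 = s := by omega
          have hne : s ≠ 0 := by omega
          rw [hq, hr]
          simp [hne]
    · simp [hpos]

theorem pvLoopA_eq (s : Int) :
    pvLoopA s = if 0 < s then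
      List.replicate (PySem.Int.floordiv s 10).toNat 10 ++
        (if PySem.Int.mod s 10 ≠ 0 then [PySem.Int.mod s 10] else [])
    else [] := by
  rw [pvLoopA_closed s.toNat s rfl]
  by_cases hpos : 0 < s
  · rw [PySem.Int.floordiv_eq_ediv_of_pos (by omega), PySem.Int.mod_eq_emod_of_pos (by omega)]
  · simp [hpos]

-- ===== VERDICT (by name: the statement is the Claim_ definition above) =====
theorem player_cards_spec : Claim_equal_player_cards := by
  intro player_sum player_usable_ace _
  unfold Spec_player_cards player_cards player_cards_alt
  cases player_usable_ace <;> simp only [if_true, if_false, Bool.false_eq_true] <;>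
    rw [pvLoopA_eq] <;> split <;> simp
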